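-- pv_equiv track=rewrite | github.com/dhodge180/ChessNavigator | djhchess/fen_mapper.py | expand_multiple_blank_rows
-- ===== SOURCE A (Python) =====
-- def expand_multiple_blank_rows(board_part):
--     """
--        Expand numbers that are multiples of 8 (>=16) in the board part into
--        repeated '8' ranks separated by '/'.
--        E.g. '24' -> '8/8/8', 'rnbqkbnr/24/8' -> 'rnbqkbnr/8/8/8/8'
--     """
--     result = []
--     i = 0
--     while i < len(board_part):
--         ch = board_part[i]
--         if '0' <= ch <= '9':
--             # Consume full multi-digit number
--             j = i
--             while j < len(board_part) and '0' <= board_part[j] <= '9':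
--                 j += 1
--             n = int(board_part[i:j])
--             if n % 8 == 0 and n >= 16:
--                 result.append('/'.join(['8'] * (n // 8)))
--             else:
--                 result.append(board_part[i:j])
--             i = j
--         else:
--             result.append(ch)
--             i += 1
--     return ''.join(result)
-- ===== SOURCE B (Python) =====
-- def expand_multiple_blank_rows(board_part):
--     """One-pass state machine: accumulate a pending digit run, flush it on
--        each non-digit character and at the end."""
--     def flush(tok):
--         if not tok:
--             return ''
--         n = int(tok)
--         if n >= 16 and n % 8 == 0:
--             return '8' + '/8' * (n // 8 - 1)
--         return tok
--     pieces = []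
--     tok = ''
--     for ch in board_part:
--         if '0' <= ch <= '9':
--             tok += ch
--         else:
--             pieces.append(flush(tok))
--             tok = ''
--             pieces.append(ch)
--     pieces.append(flush(tok))
--     return ''.join(pieces)
-- ===== Notes on version B (the rewrite author's own statement) =====
-- stated objective: alternative
-- what changed: Replaced A's index-based while-loop with an inner digit-run scan and string slicing by a single for-each pass that carries a pending digit-token accumulator (state machine), flushing it on each non-digit and at the end, and builds the expansion by string repetition instead of a join over a replicated list.
import Mathlib
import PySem

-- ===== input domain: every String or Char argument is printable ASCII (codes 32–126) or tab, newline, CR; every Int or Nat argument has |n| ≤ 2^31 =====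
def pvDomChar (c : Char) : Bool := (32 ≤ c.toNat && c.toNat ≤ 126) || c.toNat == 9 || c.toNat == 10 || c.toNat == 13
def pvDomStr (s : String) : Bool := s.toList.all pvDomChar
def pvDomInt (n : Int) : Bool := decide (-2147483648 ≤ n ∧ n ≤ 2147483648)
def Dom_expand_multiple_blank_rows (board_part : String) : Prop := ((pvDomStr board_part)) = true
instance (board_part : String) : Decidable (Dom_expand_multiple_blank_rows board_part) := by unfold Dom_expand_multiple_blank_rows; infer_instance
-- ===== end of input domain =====

-- B replaces A's index/inner-scan/slice loop by a one-pass state machine with a pending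
-- digit-token accumulator (objective: alternative; same O(n) cost).

-- '0' <= ch <= '9' (both programs test this on single chars)
def pvIsDig (c : Char) : Bool := decide ('0' ≤ c ∧ c ≤ '9')

-- int(s) on a (nonempty, all-ASCII-digit) run: exact — Python int on such a string is this fold
def pvDigitsToNat (ds : List Char) : Nat := ds.foldl (fun a c => a * 10 + (c.toNat - 48)) 0

-- ===== PORT A =====
-- '/'.join(['8'] * k): exact hand port of the join on k copies of "8"
def pvJoinSlash : Nat → List Char
  | 0 => []
  | 1 => ['8']
  | (k+2) => '8' :: '/' :: pvJoinSlash (k+1)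

-- A's while-loop: the inner digit-scan is the takeWhile/dropWhile split at position i
def pvALoop : List Char → List Char
  | [] => []
  | c :: rest =>
    if h : pvIsDig c = true then
      let ds := List.takeWhile pvIsDig (c :: rest)
      let rest' := List.dropWhile pvIsDig (c :: rest)
      let n := pvDigitsToNat ds
      (if n % 8 = 0 ∧ 16 ≤ n then pvJoinSlash (n / 8) else ds) ++ pvALoop rest'
    else c :: pvALoop rest
  termination_by cs => cs.length
  decreasing_by
  · simp only [List.dropWhile_cons, h, if_true]
    exact Nat.lt_succ_of_le (List.length_dropWhile_le _ _)
  · simp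

def expand_multiple_blank_rows (board_part : String) : String :=
  String.mk (pvALoop board_part.toList)

-- ===== PORT B =====
-- flush(tok): '' on empty token; '8' + '/8' * (n//8 - 1) on a qualifying number, else tok
def pvFlush (tok : List Char) : List Char :=
  if tok = [] then []
  else
    let n := pvDigitsToNat tok
    if 16 ≤ n ∧ n % 8 = 0 then '8' :: (List.replicate (n / 8 - 1) ['/', '8']).flatten else tok

-- B's for-loop over the characters with the pending token as extra state
def pvBLoop : List Char → List Char → List Char
  | [], tok => pvFlush tok
  | c :: rest, tok =>
    if pvIsDig c then pvBLoop rest (tok ++ [c])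
    else pvFlush tok ++ c :: pvBLoop rest []

def expand_multiple_blank_rows_alt (board_part : String) : String :=
  String.mk (pvBLoop board_part.toList [])

-- ===== PRECONDITION & SPEC =====
def Spec_expand_multiple_blank_rows (board_part : String) (out : String) : Prop := out = expand_multiple_blank_rows_alt board_part
instance (board_part : String) (out : String) : Decidable (Spec_expand_multiple_blank_rows board_part out) := by unfold Spec_expand_multiple_blank_rows; infer_instance

-- ===== CLAIM (what is proved, stated in full; the proofs are below) =====
def Claim_equal_expand_multiple_blank_rows : Prop := ∀ (board_part : String), Dom_expand_multiple_blank_rows board_part → Spec_expand_multiple_blank_rows board_part (expand_multiple_blank_rows board_part)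

-- ===== LEMMAS AND PROOFS =====

-- what pvBLoop does after the current digit run ends (next char, if any, is a non-digit)
def pvBRest : List Char → List Char
  | [] => []
  | c :: rest => c :: pvBLoop rest []

lemma pvBLoop_split (cs : List Char) : ∀ tok : List Char,
    pvBLoop cs tok = pvFlush (tok ++ cs.takeWhile pvIsDig) ++ pvBRest (cs.dropWhile pvIsDig) := by
  induction cs with
  | nil => intro tok; simp [pvBLoop, pvBRest]
  | cons c rest ih =>
    intro tok
    by_cases h : pvIsDig c = true
    · simp [pvBLoop, h, List.takeWhile_cons, List.dropWhile_cons, ih (tok ++ [c])]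
    · simp [pvBLoop, h, List.takeWhile_cons, List.dropWhile_cons, pvBRest]

lemma pvJoinSlash_succ (k : Nat) :
    pvJoinSlash (k + 1) = '8' :: (List.replicate k ['/', '8']).flatten := by
  induction k with
  | zero => rfl
  | succ k ih =>
    rw [show k + 1 + 1 = k + 2 from rfl, pvJoinSlash, ih]
    simp [List.replicate_succ]

lemma pvFlush_eq (ds : List Char) (hne : ds ≠ []) :
    pvFlush ds =
      if pvDigitsToNat ds % 8 = 0 ∧ 16 ≤ pvDigitsToNat ds
      then pvJoinSlash (pvDigitsToNat ds / 8) else ds := by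
  unfold pvFlush
  rw [if_neg hne]
  by_cases h1 : pvDigitsToNat ds % 8 = 0 <;> by_cases h2 : 16 ≤ pvDigitsToNat ds <;>
    simp only [h1, h2, and_true, and_false, true_and, false_and, if_true, if_false, if_neg, if_pos]
  · have hk : 2 ≤ pvDigitsToNat ds / 8 := (Nat.le_div_iff_mul_le (by norm_num)).2 (by omega)
    have : pvDigitsToNat ds / 8 - 1 + 1 = pvDigitsToNat ds / 8 := by omega
    rw [← this, pvJoinSlash_succ]
    simp
  all_goals simp

lemma pvDropWhile_head_not (p : Char → Bool) (l : List Char) :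
    ∀ c rest, l.dropWhile p = c :: rest → p c = false := by
  induction l with
  | nil => intro c rest h; simp [List.dropWhile] at h
  | cons a l ih =>
    intro c rest h
    by_cases ha : p a = true
    · rw [List.dropWhile_cons, if_pos ha] at h; exact ih c rest h
    · rw [List.dropWhile_cons, if_neg ha] at h
      cases h; simpa using ha

lemma pvMain : ∀ n (cs : List Char), cs.length ≤ n → pvALoop cs = pvBLoop cs [] := by
  intro n
  induction n with
  | zero =>
    intro cs h
    have : cs = [] := List.eq_nil_of_length_eq_zero (Nat.le_zero.mp h)
    subst this
    simp [pvALoop, pvBLoop, pvFlush]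
  | succ n ih =>
    intro cs hlen
    match cs with
    | [] => simp [pvALoop, pvBLoop, pvFlush]
    | c :: rest =>
      by_cases h : pvIsDig c = true
      · have hds : List.takeWhile pvIsDig (c :: rest) ≠ [] := by
          simp [List.takeWhile_cons, h]
        have hlen' : (List.dropWhile pvIsDig (c :: rest)).length ≤ n := by
          simp only [List.dropWhile_cons, h, if_true]
          have := List.length_dropWhile_le pvIsDig rest
          simp at hlen; omega
        have hrest : pvALoop (List.dropWhile pvIsDig (c :: rest)) =
            pvBRest (List.dropWhile pvIsDig (c :: rest)) := by
          cases hdw : List.dropWhile pvIsDig (c :: rest) with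
          | nil => simp [pvALoop, pvBRest]
          | cons c' r =>
            have hc' : pvIsDig c' = false := pvDropWhile_head_not _ _ _ _ hdw
            rw [pvBRest, pvALoop, dif_neg (by simp [hc'])]
            rw [hdw] at hlen'
            have hr : r.length ≤ n := by simp at hlen'; omega
            rw [ih r hr]
        rw [pvBLoop_split, List.nil_append, pvFlush_eq _ hds, ← hrest]
        simp only [pvALoop, dif_pos h]
      · rw [pvALoop, dif_neg h, pvBLoop, if_neg h]
        have hr : rest.length ≤ n := by simp at hlen; omega
        rw [ih rest hr]
        simp [pvFlush]

-- ===== VERDICT (by name: the statement is the Claim_ definition above) =====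
theorem expand_multiple_blank_rows_spec : Claim_equal_expand_multiple_blank_rows := by
  intro s _
  unfold Spec_expand_multiple_blank_rows expand_multiple_blank_rows expand_multiple_blank_rows_alt
  rw [pvMain s.toList.length s.toList le_rfl]
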